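-- pv_equiv track=rewrite | github.com/moon6pence/DailyCode | NLTK/chunker.py | train_sent
-- ===== SOURCE A (Python) =====
-- def train_sent(sent):
-- 	words = []
-- 	for index in range(len(sent)):
-- 		if index > 0:
-- 			prev = sent[index - 1][1]
-- 		else:
-- 			prev = "^"
--
-- 		if index < len(sent) - 1:
-- 			next = sent[index + 1][1]
-- 		else:
-- 			next = "$"
--
-- 		word = prev + " " + sent[index][1] + " " + next
-- 		tag = sent[index][2]
-- 		words.append((word, tag))
--
-- 	return words
-- ===== SOURCE B (Python) =====
-- def train_sent(sent):
--     def go(prev, rest):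
--         if not rest:
--             return []
--         cur = rest[0]
--         nxt = rest[1][1] if len(rest) > 1 else "$"
--         return [(prev + " " + cur[1] + " " + nxt, cur[2])] + go(cur[1], rest[1:])
--     return go("^", sent)
-- ===== Notes on version B (the rewrite author's own statement) =====
-- stated objective: alternative
-- what changed: Replaced A's index loop with boundary ifs and repeated sent[i-1]/sent[i+1] indexing by a structural recursion over the list that carries the previous tag as an accumulator and peeks one element ahead, so no indexing or length arithmetic is needed.
import Mathlib
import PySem

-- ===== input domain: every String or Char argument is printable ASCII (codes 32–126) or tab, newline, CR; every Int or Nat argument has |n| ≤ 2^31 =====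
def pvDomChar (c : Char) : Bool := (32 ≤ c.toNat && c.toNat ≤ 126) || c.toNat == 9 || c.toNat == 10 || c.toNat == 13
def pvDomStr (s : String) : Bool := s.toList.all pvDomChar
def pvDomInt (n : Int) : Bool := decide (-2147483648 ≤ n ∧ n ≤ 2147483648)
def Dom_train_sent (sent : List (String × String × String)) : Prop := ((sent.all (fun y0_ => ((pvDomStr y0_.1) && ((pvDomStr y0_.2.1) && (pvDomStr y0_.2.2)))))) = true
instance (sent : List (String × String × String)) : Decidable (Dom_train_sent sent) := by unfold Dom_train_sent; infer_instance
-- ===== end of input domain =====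

-- B replaces A's index loop with boundary ifs by a structural recursion carrying the previous tag and peeking one element ahead (alternative decomposition; same cost).

-- ===== PORT A =====
def train_sent (sent : List (String × String × String)) : List (String × String) :=
  (PySem.List.pyRange 0 (sent.length) 1).foldl (fun words index =>
    let prev := if index > 0 then (PySem.List.pyGetD sent (index - 1) ("", "", "")).2.1 else "^"
    let next := if index < (sent.length : Int) - 1 then (PySem.List.pyGetD sent (index + 1) ("", "", "")).2.1 else "$"
    let word := prev ++ " " ++ (PySem.List.pyGetD sent index ("", "", "")).2.1 ++ " " ++ next
    let tag := (PySem.List.pyGetD sent index ("", "", "")).2.2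
    words ++ [(word, tag)]) []

-- ===== PORT B =====
-- The inner recursive helper `go(prev, rest)` of Source B.
def pvTrainGo (prev : String) (rest : List (String × String × String)) : List (String × String) :=
  match rest with
  | [] => []
  | cur :: rest' =>
    let nxt := match rest' with | [] => "$" | n :: _ => n.2.1
    [(prev ++ " " ++ cur.2.1 ++ " " ++ nxt, cur.2.2)] ++ pvTrainGo cur.2.1 rest'

def train_sent_alt (sent : List (String × String × String)) : List (String × String) :=
  pvTrainGo "^" sent

-- ===== PRECONDITION & SPEC =====
def Spec_train_sent (sent : List (String × String × String)) (out : List (String × String)) : Prop := out = train_sent_alt sent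
instance (sent : List (String × String × String)) (out : List (String × String)) : Decidable (Spec_train_sent sent out) := by unfold Spec_train_sent; infer_instance

-- ===== CLAIM =====
def Claim_equal_train_sent : Prop := ∀ (sent : List (String × String × String)), Dom_train_sent sent → Spec_train_sent sent (train_sent sent)

-- ===== LEMMAS AND PROOFS =====

-- A's loop body as a function of the index
def pvBody (sent : List (String × String × String)) (index : Int) : String × String :=
    let prev := if index > 0 then (PySem.List.pyGetD sent (index - 1) ("", "", "")).2.1 else "^"
    let next := if index < (sent.length : Int) - 1 then (PySem.List.pyGetD sent (index + 1) ("", "", "")).2.1 else "$"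
    (prev ++ " " ++ (PySem.List.pyGetD sent index ("", "", "")).2.1 ++ " " ++ next,
     (PySem.List.pyGetD sent index ("", "", "")).2.2)

-- A's fold over range(len(sent)) is a map of pvBody over the indices
theorem train_sent_eq_map (sent : List (String × String × String)) :
    train_sent sent = (List.range sent.length).map (fun (i : Nat) => pvBody sent (i : Int)) := by
  unfold train_sent pvBody
  rw [PySem.List.pyRange_zero_natCast, List.foldl_map, PySem.List.foldl_append_singleton_eq_map]
  simp

-- the common elementwise description both sides are reduced to
def pvElem (sent : List (String × String × String)) (i : Nat) (h : i < sent.length) : String × String :=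
  ((if _h0 : i = 0 then "^" else (sent[i-1]'(by omega)).2.1) ++ " " ++ sent[i].2.1 ++ " " ++
     (if h2 : i + 1 < sent.length then (sent[i+1]'h2).2.1 else "$"),
   sent[i].2.2)

theorem pvBody_elem (sent : List (String × String × String)) (i : Nat) (h : i < sent.length) :
    pvBody sent (i : Int) = pvElem sent i h := by
  unfold pvBody pvElem
  rcases i with _ | j
  · simp only [Nat.cast_zero, show ¬((0:Int) > 0) by omega, if_false]
    rw [PySem.List.pyGetD_eq_getElem sent (i := 0) _ (by omega) (by omega)]
    by_cases hn : 1 < sent.length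
    · rw [if_pos (by omega), dif_pos (by omega : 0 + 1 < sent.length)]
      rw [PySem.List.pyGetD_eq_getElem sent (i := 0 + 1) _ (by omega) (by omega)]
      simp
    · rw [if_neg (by omega), dif_neg (by omega : ¬ 0 + 1 < sent.length)]
      simp
  · have hc : ((j + 1 : Nat) : Int) = (j : Int) + 1 := by push_cast; ring
    rw [hc]
    rw [if_pos (by omega), show (j:Int) + 1 - 1 = (j:Int) by ring, dif_neg (Nat.succ_ne_zero j)]
    rw [PySem.List.pyGetD_eq_getElem sent (i := (j:Int)) _ (by omega) (by omega)]
    rw [PySem.List.pyGetD_eq_getElem sent (i := (j:Int)+1) _ (by omega) (by omega)]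
    by_cases hn : j + 2 < sent.length
    · rw [if_pos (by omega), dif_pos (by omega : j + 1 + 1 < sent.length)]
      rw [PySem.List.pyGetD_eq_getElem sent (i := (j:Int)+1+1) _ (by omega) (by omega)]
      simp
      congr 1
    · rw [if_neg (by omega), dif_neg (by omega : ¬ j + 1 + 1 < sent.length)]
      simp

theorem pvTrainGo_length (prev : String) (rest : List (String × String × String)) :
    (pvTrainGo prev rest).length = rest.length := by
  induction rest generalizing prev with
  | nil => rfl
  | cons cur rest' ih => simp [pvTrainGo, ih]

theorem pvTrainGo_get (prev : String) (rest : List (String × String × String))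
    (i : Nat) (h : i < rest.length) :
    (pvTrainGo prev rest)[i]'(by rw [pvTrainGo_length]; exact h) =
      ((if _h0 : i = 0 then prev else (rest[i-1]'(by omega)).2.1) ++ " " ++ rest[i].2.1 ++ " " ++
         (if h2 : i + 1 < rest.length then (rest[i+1]'h2).2.1 else "$"),
       rest[i].2.2) := by
  induction rest generalizing prev i with
  | nil => simp at h
  | cons cur rest' ih =>
    rcases i with _ | j
    · cases rest' with
      | nil => simp [pvTrainGo]
      | cons n r => simp [pvTrainGo]
    · have hj : j < rest'.length := by simpa using h
      simp only [pvTrainGo, List.singleton_append, List.getElem_cons_succ]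
      rw [ih cur.2.1 j hj]
      rcases j with _ | k
      · cases rest' with
        | nil => simp at hj
        | cons n r => cases r <;> simp
      · simp only [dif_neg (Nat.succ_ne_zero k), dif_neg (Nat.succ_ne_zero (k+1))]
        simp only [Nat.add_sub_cancel, List.getElem_cons_succ, List.length_cons]
        by_cases hb : k + 1 + 1 < rest'.length
        · rw [dif_pos hb, dif_pos (by omega : k + 1 + 1 + 1 < rest'.length + 1)]
        · rw [dif_neg hb, dif_neg (by omega : ¬ k + 1 + 1 + 1 < rest'.length + 1)]

theorem map_pvBody_eq_alt (sent : List (String × String × String)) :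
    (List.range sent.length).map (fun (i : Nat) => pvBody sent (i : Int)) = train_sent_alt sent := by
  apply List.ext_getElem
  · simp [train_sent_alt, pvTrainGo_length]
  · intro i h1 h2
    simp only [List.length_map, List.length_range] at h1
    simp only [List.getElem_map, List.getElem_range]
    rw [pvBody_elem sent i h1]
    exact (pvTrainGo_get "^" sent i h1).symm

-- ===== VERDICT =====
theorem train_sent_spec : Claim_equal_train_sent := by
  intro sent _
  unfold Spec_train_sent
  rw [train_sent_eq_map, map_pvBody_eq_alt]
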